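-- pv_equiv track=rewrite | github.com/llamington/COSC121 | lab_5.py | num_rushes
-- ===== SOURCE A (Python) =====
-- def num_rushes(slope_height, rush_height_gain, back_sliding):
--     """Calculates the number of rushes required to get up scree slope"""
--     current_height = 0
--     rushes = 1
--     current_height += rush_height_gain
--     while current_height < slope_height:
--         current_height -= back_sliding
--         rushes += 1
--         current_height += rush_height_gain
--     return rushes
-- ===== SOURCE B (Python) =====
-- def num_rushes(slope_height, rush_height_gain, back_sliding):
--     """Calculates the number of rushes required to get up scree slope"""
--     if slope_height <= rush_height_gain:
--         return 1
--     net = rush_height_gain - back_sliding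
--     # ceiling division of the remaining height by the net gain per extra rush
--     return 1 - (-(slope_height - rush_height_gain)) // net
-- ===== Notes on version B (the rewrite author's own statement) =====
-- stated objective: simpler
-- what changed: Replaced the simulation loop (one iteration per rush) with a closed-form ceiling division: 1 plus ceil((slope_height - rush_height_gain) / (rush_height_gain - back_sliding)).
-- outside the precondition, e.g. on num_rushes(10, 2, 3): A does not finish within the time limit, B returns -7; on num_rushes(10, 2, 2): A does not finish within the time limit, B raises ZeroDivisionError
import Mathlib
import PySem

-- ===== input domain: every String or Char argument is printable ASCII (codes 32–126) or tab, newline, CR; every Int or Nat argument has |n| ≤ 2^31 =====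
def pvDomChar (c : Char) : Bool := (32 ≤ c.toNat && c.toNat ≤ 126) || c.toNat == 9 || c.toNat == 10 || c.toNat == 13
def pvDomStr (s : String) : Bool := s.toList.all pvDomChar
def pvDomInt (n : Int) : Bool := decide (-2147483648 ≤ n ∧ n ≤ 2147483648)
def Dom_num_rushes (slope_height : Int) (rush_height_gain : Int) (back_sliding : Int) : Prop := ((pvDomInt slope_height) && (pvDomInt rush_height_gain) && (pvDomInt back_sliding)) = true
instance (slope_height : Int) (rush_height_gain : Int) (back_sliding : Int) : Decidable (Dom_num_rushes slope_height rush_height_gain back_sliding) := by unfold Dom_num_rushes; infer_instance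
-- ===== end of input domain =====

-- B replaces A's one-iteration-per-rush while loop by a closed-form ceiling division (objective: simpler).

-- ===== PORT A =====
-- A's while loop, fuel-totalized; the fuel (slope - gain).toNat + 1 is enough for every
-- input on which the Python loop terminates (inside Pre_ height rises by ≥ 1 per iteration).
def numRushesLoop (slope_height rush_height_gain back_sliding : Int) : Nat → Int → Int → Int
  | 0, _, rushes => rushes
  | fuel + 1, current_height, rushes =>
    if current_height < slope_height then
      numRushesLoop slope_height rush_height_gain back_sliding fuel
        (current_height - back_sliding + rush_height_gain) (rushes + 1)
    else rushes

def num_rushes (slope_height : Int) (rush_height_gain : Int) (back_sliding : Int) : Int :=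
  numRushesLoop slope_height rush_height_gain back_sliding
    ((slope_height - rush_height_gain).toNat + 1) rush_height_gain 1

-- ===== PORT B =====
def num_rushes_alt (slope_height : Int) (rush_height_gain : Int) (back_sliding : Int) : Int :=
  if slope_height ≤ rush_height_gain then 1
  else
    1 - PySem.Int.floordiv (-(slope_height - rush_height_gain)) (rush_height_gain - back_sliding)

-- ===== PRECONDITION & SPEC =====
-- Pre_ excludes exactly the inputs on which A's while loop never terminates:
-- slope above the first rush with net gain per iteration ≤ 0.
def Pre_num_rushes (slope_height : Int) (rush_height_gain : Int) (back_sliding : Int) : Prop :=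
  slope_height ≤ rush_height_gain ∨ back_sliding < rush_height_gain
instance (slope_height : Int) (rush_height_gain : Int) (back_sliding : Int) : Decidable (Pre_num_rushes slope_height rush_height_gain back_sliding) := by unfold Pre_num_rushes; infer_instance

def pvWitness_num_rushes : Int × Int × Int := (10, 3, 1)

def Spec_num_rushes (slope_height : Int) (rush_height_gain : Int) (back_sliding : Int) (out : Int) : Prop := out = num_rushes_alt slope_height rush_height_gain back_sliding
instance (slope_height : Int) (rush_height_gain : Int) (back_sliding : Int) (out : Int) : Decidable (Spec_num_rushes slope_height rush_height_gain back_sliding out) := by unfold Spec_num_rushes; infer_instance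

-- ===== CLAIM (what is proved, stated in full; the proofs are below) =====
def Claim_equal_num_rushes : Prop := ∀ (slope_height : Int) (rush_height_gain : Int) (back_sliding : Int), Dom_num_rushes slope_height rush_height_gain back_sliding → Pre_num_rushes slope_height rush_height_gain back_sliding → Spec_num_rushes slope_height rush_height_gain back_sliding (num_rushes slope_height rush_height_gain back_sliding)

-- ===== LEMMAS AND PROOFS =====

-- When the loop condition is already false, any fuel returns the accumulator.
theorem numRushesLoop_done (s g b : Int) (fuel : Nat) (h r : Int) (hge : ¬ h < s) :
    numRushesLoop s g b fuel h r = r := by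
  cases fuel with
  | zero => rfl
  | succ f => simp [numRushesLoop, hge]

-- Loop invariant: with positive net gain and enough fuel, the loop computes
-- r + ceil((s - h) / net) when h < s, else r.
theorem numRushesLoop_eq (s g b : Int) (hnet : 0 < g - b) :
    ∀ (fuel : Nat) (h r : Int), s - h ≤ fuel →
      numRushesLoop s g b fuel h r =
        r + (if h < s then -(PySem.Int.floordiv (-(s - h)) (g - b)) else 0) := by
  intro fuel
  induction fuel with
  | zero =>
    intro h r hle
    have : ¬ h < s := by simpa using hle
    simp [numRushesLoop, this]
  | succ f ih =>
    intro h r hle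
    by_cases hlt : h < s
    · have hstep : numRushesLoop s g b (f + 1) h r =
          numRushesLoop s g b f (h - b + g) (r + 1) := by
        simp [numRushesLoop, hlt]
      rw [hstep, ih (h - b + g) (r + 1) (by push_cast at hle ⊢; omega)]
      by_cases hlt2 : h - b + g < s
      · -- both sides: ceil(x/n) = 1 + ceil((x-n)/n) for the remaining heights
        have h1 : -(PySem.Int.floordiv (-(s - h)) (g - b)) =
            -(PySem.Int.floordiv (-(s - (h - b + g))) (g - b)) + 1 := by
          rw [PySem.Int.neg_floordiv_neg_eq_iff_of_pos hnet]
          have := (PySem.Int.neg_floordiv_neg_eq_iff_of_pos (a := s - (h - b + g)) (b := g - b)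
            (q := -(PySem.Int.floordiv (-(s - (h - b + g))) (g - b))) hnet).mp rfl
          constructor <;> nlinarith [this.1, this.2]
        simp only [hlt, hlt2, if_true]
        omega
      · -- last iteration: 0 < s - h ≤ net, ceiling is 1
        have h1 : -(PySem.Int.floordiv (-(s - h)) (g - b)) = 1 := by
          rw [PySem.Int.neg_floordiv_neg_eq_iff_of_pos hnet]
          constructor <;> nlinarith
        simp only [hlt, hlt2, if_true, if_false]
        omega
    · rw [numRushesLoop_done s g b _ h r hlt]
      simp [hlt]

-- ===== VERDICT (by name: the statement is the Claim_ definition above) =====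
theorem num_rushes_spec : Claim_equal_num_rushes := by
  intro s g b _ hpre
  unfold Spec_num_rushes num_rushes num_rushes_alt
  by_cases hle : s ≤ g
  · rw [numRushesLoop_done s g b _ g 1 (by omega)]
    simp [hle]
  · have hnet : 0 < g - b := by
      rcases hpre with h | h
      · omega
      · omega
    rw [numRushesLoop_eq s g b hnet _ g 1 (by omega)]
    have hlt : g < s := by omega
    simp only [hlt, if_true, hle, if_false]
    ring
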